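-- pv_equiv track=rewrite | github.com/Bugswriter/pve2influx | modules/sensors.py | parse_sensors_output
-- ===== SOURCE A (Python) =====
-- def parse_sensors_output(output):
--     sensor_data = {}
--     current_adapter = None
--     lines = output.split('\n')
--     for line in lines:
--         line = line.strip()
--         if line.startswith("Adapter:"):
--             current_adapter = line.split(":")[1].strip()
--             sensor_data[current_adapter] = {}
--         elif current_adapter and ':' in line:
--             key_value = line.split(":")
--             if len(key_value) >= 2:
--                 key, value = key_value[0].strip(), ':'.join(key_value[1:]).strip()
--                 sensor_data[current_adapter][key] = value
--     return sensor_data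
-- ===== SOURCE B (Python) =====
-- def parse_sensors_output(output):
--     # Pass 1: cut the output into (adapter-name, body-lines) sections.
--     sections = []
--     name = None
--     body = []
--     for raw in output.split('\n'):
--         line = raw.strip()
--         if line.startswith("Adapter:"):
--             if name is not None:
--                 sections.append((name, body))
--             name = line.split(":")[1].strip()
--             body = []
--         elif name:
--             body.append(line)
--     if name is not None:
--         sections.append((name, body))
--     # Pass 2: parse each section's body into its sub-dict (last section wins for a repeated name).
--     sensor_data = {}
--     for name, body in sections:
--         entries = {}
--         for line in body:
--             if ':' in line:
--                 parts = line.split(':')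
--                 entries[parts[0].strip()] = ':'.join(parts[1:]).strip()
--         sensor_data[name] = entries
--     return sensor_data
-- ===== Notes on version B (the rewrite author's own statement) =====
-- stated objective: alternative
-- what changed: Replaces A's single-pass state machine that mutates a nested dict per line with a two-pass decomposition: first group the lines into per-adapter (name, body) sections, then parse each section's body into its sub-dict and assemble the result.
import Mathlib
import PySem

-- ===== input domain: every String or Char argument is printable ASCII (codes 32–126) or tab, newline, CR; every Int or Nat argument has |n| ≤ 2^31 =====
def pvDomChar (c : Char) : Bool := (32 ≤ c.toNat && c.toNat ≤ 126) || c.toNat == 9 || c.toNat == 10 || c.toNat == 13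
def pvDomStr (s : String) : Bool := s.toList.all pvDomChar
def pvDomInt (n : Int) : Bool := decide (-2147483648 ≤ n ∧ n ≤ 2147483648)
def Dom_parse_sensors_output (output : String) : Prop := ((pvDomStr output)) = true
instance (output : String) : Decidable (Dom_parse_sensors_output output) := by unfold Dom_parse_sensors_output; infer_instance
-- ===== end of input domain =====

-- B re-parses the same output in two passes (group lines into per-adapter sections, then parse each
-- section into its sub-dict) instead of A's single-pass state machine over a nested dict; objective:
-- a different decomposition of the same O(n) work, not speed.

-- s.split(sep) for a non-empty literal sep; Str.split? is none only for sep = "", so getD is exact here.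
def pvSplit (s sep : String) : List String := (PySem.Str.split? s sep).getD []

-- ===== PORT A =====
-- one step of A's loop body over (sensor_data, current_adapter)
def pvStepA (st : PySem.Dict String (PySem.Dict String String) × Option String) (raw : String) :
    PySem.Dict String (PySem.Dict String String) × Option String :=
  let line := PySem.Str.strip raw
  if PySem.Str.startswith line "Adapter:" then
    -- line.split(":")[1]: the index is in range because line starts with "Adapter:", so the default "" is never used
    let ca := PySem.Str.strip (PySem.List.pyGetD (pvSplit line ":") 1 "")
    (st.1.insert ca PySem.Dict.empty, some ca)
  else
    match st.2 with
    | some c =>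
      -- 'current_adapter and ...': a set adapter name is falsy exactly when it is ""
      if c != "" && PySem.Str.isIn ":" line then
        let kv := pvSplit line ":"
        if 2 ≤ kv.length then
          let key := PySem.Str.strip (PySem.List.pyGetD kv 0 "")
          let value := PySem.Str.strip (PySem.Str.join ":" (kv.drop 1))
          -- sensor_data[current_adapter][key] = value: c is always a key of sensor_data here, so the
          -- modify default Dict.empty is never used and this is Python's in-place nested update
          (st.1.modify c PySem.Dict.empty (fun d => d.insert key value), st.2)
        else st
      else st
    | none => st

def parse_sensors_output (output : String) : List (String × List (String × String)) :=
  let final := (pvSplit output "\n").foldl pvStepA (PySem.Dict.empty, none)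
  final.1.items.map (fun p => (p.1, p.2.items))

-- ===== PORT B =====
-- pass 2 inner loop: parse one section body into its sub-dict
def pvParseSection (body : List String) : PySem.Dict String String :=
  body.foldl (fun entries line =>
    if PySem.Str.isIn ":" line then
      let parts := pvSplit line ":"
      entries.insert (PySem.Str.strip (PySem.List.pyGetD parts 0 ""))
                     (PySem.Str.strip (PySem.Str.join ":" (parts.drop 1)))
    else entries) PySem.Dict.empty

-- pass 1 step over (sections, name, body)
def pvStepB (st : List (String × List String) × Option String × List String) (raw : String) :
    List (String × List String) × Option String × List String :=
  let line := PySem.Str.strip raw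
  if PySem.Str.startswith line "Adapter:" then
    ((match st.2.1 with | some n => st.1 ++ [(n, st.2.2)] | none => st.1),
     -- index in range for the same reason as in A's port
     some (PySem.Str.strip (PySem.List.pyGetD (pvSplit line ":") 1 "")), ([] : List String))
  else
    match st.2.1 with
    | some n => if n != "" then (st.1, some n, st.2.2 ++ [line]) else st
    | none => st

def pvSections (lines : List String) : List (String × List String) :=
  let st := lines.foldl pvStepB ([], none, [])
  match st.2.1 with | some n => st.1 ++ [(n, st.2.2)] | none => st.1

def parse_sensors_output_alt (output : String) : List (String × List (String × String)) :=
  let sd := (pvSections (pvSplit output "\n")).foldl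
      (fun sd sec => sd.insert sec.1 (pvParseSection sec.2)) PySem.Dict.empty
  sd.items.map (fun p => (p.1, p.2.items))

-- ===== PRECONDITION & SPEC =====
def Spec_parse_sensors_output (output : String) (out : List (String × List (String × String))) : Prop := out = parse_sensors_output_alt output
instance (output : String) (out : List (String × List (String × String))) : Decidable (Spec_parse_sensors_output output out) := by unfold Spec_parse_sensors_output; infer_instance

-- ===== CLAIM (what is proved, stated in full; the proofs are below) =====
def Claim_equal_parse_sensors_output : Prop := ∀ (output : String), Dom_parse_sensors_output output → Spec_parse_sensors_output output (parse_sensors_output output)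

-- ===== LEMMAS AND PROOFS =====

-- pending sections flushed into the section list
def pvFlush (name : Option String) (body : List String) : List (String × List String) :=
  match name with | some n => [(n, body)] | none => []

-- B's pass-2 dict built from a section list
def pvBuild (ss : List (String × List String)) : PySem.Dict String (PySem.Dict String String) :=
  ss.foldl (fun sd sec => sd.insert sec.1 (pvParseSection sec.2)) PySem.Dict.empty

-- abstraction: A's loop state determined by B's pass-1 state
def pvAbs (st : List (String × List String) × Option String × List String) :
    PySem.Dict String (PySem.Dict String String) × Option String :=
  (pvBuild (st.1 ++ pvFlush st.2.1 st.2.2), st.2.1)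

theorem pvGo_len_ge (sep : List Char) :
    ∀ (fuel : Nat) (l cur : List Char) (acc : List (List Char)),
      acc.length + 1 ≤ (PySem.Chars.splitOn.go sep fuel l cur acc).length := by
  intro fuel
  induction fuel with
  | zero => intro l cur acc; simp [PySem.Chars.splitOn.go]
  | succ fuel ih =>
    intro l cur acc
    cases l with
    | nil => simp [PySem.Chars.splitOn.go]
    | cons c rest =>
      rw [PySem.Chars.splitOn.go]
      by_cases hp : sep.isPrefixOf (c :: rest) = true
      · rw [if_pos hp]
        have := ih (List.drop sep.length (c :: rest)) [] ((cur.reverse : List Char) :: acc)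
        simp at this ⊢; omega
      · rw [if_neg hp]; exact ih rest (c :: cur) acc

theorem pvGo_len_two (sep : List Char) (hsep : sep ≠ []) :
    ∀ (fuel : Nat) (l cur : List Char) (acc : List (List Char)),
      l.length ≤ fuel → sep <:+: l →
      acc.length + 2 ≤ (PySem.Chars.splitOn.go sep fuel l cur acc).length := by
  intro fuel
  induction fuel with
  | zero =>
    intro l cur acc hlen hinf
    have : l = [] := List.eq_nil_of_length_eq_zero (Nat.le_zero.mp hlen)
    subst this
    exact absurd (List.eq_nil_of_infix_nil hinf) hsep
  | succ fuel ih =>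
    intro l cur acc hlen hinf
    cases l with
    | nil => exact absurd (List.eq_nil_of_infix_nil hinf) hsep
    | cons c rest =>
      rw [PySem.Chars.splitOn.go]
      by_cases hp : sep.isPrefixOf (c :: rest) = true
      · rw [if_pos hp]
        have := pvGo_len_ge sep fuel (List.drop sep.length (c :: rest)) []
          ((cur.reverse : List Char) :: acc)
        simp at this ⊢; omega
      · rw [if_neg hp]
        rcases List.infix_cons_iff.mp hinf with hpre | hinf'
        · exact absurd (List.isPrefixOf_iff_prefix.mpr hpre) hp
        · exact ih rest (c :: cur) acc (by simp at hlen; omega) hinf'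

theorem pvSplit_len_two (line : String) (h : PySem.Str.isIn ":" line = true) :
    2 ≤ (pvSplit line ":").length := by
  have hinf : [':'] <:+: line.toList := by
    rw [PySem.Str.isIn_eq] at h
    exact (PySem.Chars.isIn_iff_infix _ _).mp h
  have h2 : 2 ≤ (PySem.Chars.splitOn line.toList [':']).length := by
    have := pvGo_len_two [':'] (by simp) (line.toList.length + 1) line.toList [] []
      (by omega) hinf
    simpa [PySem.Chars.splitOn] using this
  have hm := PySem.Str.split?_map line ":"
  have htl : (":" : String).toList = [':'] := rfl
  rw [htl] at hm
  cases hs : PySem.Str.split? line ":" with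
  | none => rw [hs] at hm; simp [PySem.Chars.split?] at hm
  | some ys =>
    rw [hs] at hm
    simp only [Option.map_some, PySem.Chars.split?, List.isEmpty_cons] at hm
    have hlen : ys.length = (PySem.Chars.splitOn line.toList [':']).length := by
      have := congrArg List.length (Option.some.inj hm)
      simpa using this
    simp only [pvSplit, hs, Option.getD_some]
    omega

theorem pvBuild_append_singleton (ss : List (String × List String)) (n : String) (b : List String) :
    pvBuild (ss ++ [(n, b)]) = (pvBuild ss).insert n (pvParseSection b) := by
  simp [pvBuild, List.foldl_append]

theorem pvParseSection_append (body : List String) (line : String) :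
    pvParseSection (body ++ [line]) =
      if PySem.Str.isIn ":" line then
        (pvParseSection body).insert (PySem.Str.strip (PySem.List.pyGetD (pvSplit line ":") 0 ""))
          (PySem.Str.strip (PySem.Str.join ":" ((pvSplit line ":").drop 1)))
      else pvParseSection body := by
  simp [pvParseSection, List.foldl_append]

theorem pvInsert_modify (d : PySem.Dict String (PySem.Dict String String)) (k : String)
    (v : PySem.Dict String String) (f : PySem.Dict String String → PySem.Dict String String) :
    (d.insert k v).modify k PySem.Dict.empty f = d.insert k (f v) := by
  rw [PySem.Dict.modify, PySem.Dict.getD_insert_self, PySem.Dict.insert_insert_self]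

theorem pvStep_comm (st : List (String × List String) × Option String × List String) (raw : String) :
    pvStepA (pvAbs st) raw = pvAbs (pvStepB st raw) := by
  rcases st with ⟨secs, name, body⟩
  cases name with
  | none =>
    simp only [pvStepA, pvStepB, pvAbs, pvFlush, List.append_nil]
    by_cases hdr : PySem.Str.startswith (PySem.Str.strip raw) "Adapter:" = true
    · simp only [if_pos hdr, pvBuild_append_singleton]; rfl
    · simp only [if_neg hdr, List.append_nil]
  | some n =>
    simp only [pvStepA, pvStepB, pvAbs, pvFlush]
    by_cases hdr : PySem.Str.startswith (PySem.Str.strip raw) "Adapter:" = true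
    · simp only [if_pos hdr, pvBuild_append_singleton]; rfl
    · simp only [if_neg hdr]
      by_cases hn : (n != "") = true
      · by_cases hcol : PySem.Str.isIn ":" (PySem.Str.strip raw) = true
        · have hg : (n != "" && PySem.Str.isIn ":" (PySem.Str.strip raw)) = true := by
            rw [hn, hcol]; rfl
          have hlen := pvSplit_len_two _ hcol
          simp only [if_pos hg, if_pos hlen, if_pos hn, pvBuild_append_singleton,
                     pvParseSection_append, if_pos hcol, pvInsert_modify]
        · have hg : ¬ ((n != "" && PySem.Str.isIn ":" (PySem.Str.strip raw)) = true) := by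
            simp only [Bool.and_eq_true]; exact fun h => hcol h.2
          simp only [if_neg hg, if_pos hn, pvBuild_append_singleton,
                     pvParseSection_append, if_neg hcol]
      · have hg : ¬ ((n != "" && PySem.Str.isIn ":" (PySem.Str.strip raw)) = true) := by
          simp only [Bool.and_eq_true]; exact fun h => hn h.1
        simp only [if_neg hg, if_neg hn]

theorem pvFold_comm (lines : List String)
    (st : List (String × List String) × Option String × List String) :
    lines.foldl pvStepA (pvAbs st) = pvAbs (lines.foldl pvStepB st) := by
  induction lines generalizing st with
  | nil => rfl
  | cons l ls ih => rw [List.foldl_cons, List.foldl_cons, pvStep_comm, ih]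

-- ===== VERDICT (by name: the statement is the Claim_ definition above) =====
theorem parse_sensors_output_spec : Claim_equal_parse_sensors_output := by
  intro output _
  unfold Spec_parse_sensors_output parse_sensors_output parse_sensors_output_alt pvSections
  have h0 : (PySem.Dict.empty, (none : Option String)) = pvAbs ([], none, []) := rfl
  rw [h0, pvFold_comm]
  rcases hst : (pvSplit output "\n").foldl pvStepB ([], none, []) with ⟨secs, name, body⟩
  cases name <;> simp [pvAbs, pvFlush, pvBuild]
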